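-- pv_equiv track=rewrite | github.com/McCaffertyp/Bible-Bot | bible_bot.py | handle_discord_formatting
-- ===== SOURCE A (Python) =====
-- def handle_discord_formatting(text: str) -> str:
--     discord_formatted = ""
--     for c in text:
--         if c == "_" or c == "*":
--             discord_formatted = "{0}\\{1}".format(discord_formatted, c)
--         else:
--             discord_formatted = "{0}{1}".format(discord_formatted, c)
--
--     return discord_formatted
-- ===== SOURCE B (Python) =====
-- def handle_discord_formatting(text: str) -> str:
--     return text.replace("_", "\\_").replace("*", "\\*")
-- ===== Notes on version B (the rewrite author's own statement) =====
-- stated objective: faster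
-- what changed: Replaces the per-character accumulator loop (which rebuilds the whole string on every character) with two str.replace sweeps that delegate the traversal to the string-replacement engine.
import Mathlib
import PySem

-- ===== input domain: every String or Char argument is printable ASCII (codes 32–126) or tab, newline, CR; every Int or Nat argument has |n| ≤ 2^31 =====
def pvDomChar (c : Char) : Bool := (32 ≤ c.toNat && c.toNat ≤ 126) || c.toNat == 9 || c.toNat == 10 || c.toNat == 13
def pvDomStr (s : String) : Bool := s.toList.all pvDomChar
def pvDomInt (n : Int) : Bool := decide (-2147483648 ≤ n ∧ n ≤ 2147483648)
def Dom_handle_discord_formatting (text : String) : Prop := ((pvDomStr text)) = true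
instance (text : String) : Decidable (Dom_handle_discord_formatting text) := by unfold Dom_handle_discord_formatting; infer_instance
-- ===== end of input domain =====

-- B replaces A's per-character accumulator loop with two str.replace sweeps (idiomatic).

-- ===== PORT A =====
-- A: build up the result string one character at a time, prepending '\' before '_' and '*'.
def handle_discord_formatting (text : String) : String :=
  text.toList.foldl
    (fun discord_formatted c =>
      if c == '_' || c == '*' then discord_formatted ++ "\\" ++ Char.toString c
      else discord_formatted ++ Char.toString c) ""

-- ===== PORT B =====
-- B: text.replace("_", "\\_").replace("*", "\\*")
def handle_discord_formatting_alt (text : String) : String :=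
  PySem.Str.replace (PySem.Str.replace text "_" "\\_") "*" "\\*"

-- ===== PRECONDITION & SPEC =====
def Spec_handle_discord_formatting (text : String) (out : String) : Prop := out = handle_discord_formatting_alt text
instance (text : String) (out : String) : Decidable (Spec_handle_discord_formatting text out) := by unfold Spec_handle_discord_formatting; infer_instance

-- ===== CLAIM (what is proved, stated in full; the proofs are below) =====
def Claim_equal_handle_discord_formatting : Prop := ∀ (text : String), Dom_handle_discord_formatting text → Spec_handle_discord_formatting text (handle_discord_formatting text)

-- ===== LEMMAS AND PROOFS =====

-- Single-character replacement is a flatMap.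
theorem chars_replace_go_single (a : Char) (nw : List Char) :
    ∀ (l : List Char) (fuel : Nat) (acc : List Char), l.length ≤ fuel →
      PySem.Chars.replace.go [a] nw fuel l acc
        = acc.reverse ++ l.flatMap (fun c => if c = a then nw else [c]) := by
  intro l
  induction l with
  | nil =>
      intro fuel acc _
      cases fuel <;> simp [PySem.Chars.replace.go]
  | cons c t ih =>
      intro fuel acc hle
      cases fuel with
      | zero => simp at hle
      | succ n =>
          have ht : t.length ≤ n := by simpa using hle
          by_cases hca : c = a
          · subst hca
            rw [PySem.Chars.replace.go]
            have hpre : List.isPrefixOf [c] (c :: t) = true := by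
              simp [List.isPrefixOf]
            rw [if_pos hpre]
            have hd : List.drop [c].length (c :: t) = t := rfl
            rw [hd, ih n _ ht]
            simp
          · rw [PySem.Chars.replace.go]
            have hpre : List.isPrefixOf [a] (c :: t) = false := by
              simp [List.isPrefixOf]
              exact fun h => hca h.symm
            rw [if_neg (by simp [hpre]), ih n _ ht]
            simp [hca]

theorem chars_replace_single (a : Char) (nw cs : List Char) :
    PySem.Chars.replace cs [a] nw = cs.flatMap (fun c => if c = a then nw else [c]) := by
  rw [PySem.Chars.replace]
  simp [chars_replace_go_single a nw cs cs.length [] (le_refl _)]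

theorem portA_toList (cs : List Char) : ∀ (acc : String),
    (cs.foldl (fun discord_formatted c =>
        if c == '_' || c == '*' then discord_formatted ++ "\\" ++ Char.toString c
        else discord_formatted ++ Char.toString c) acc).toList
      = acc.toList ++ cs.flatMap (fun c => if c = '_' ∨ c = '*' then ['\\', c] else [c]) := by
  induction cs with
  | nil => intro acc; simp
  | cons c t ih =>
      intro acc
      by_cases h : c = '_' ∨ c = '*'
      · have hb : (c == '_' || c == '*') = true := by
          rcases h with h | h <;> simp [h]
        simp only [List.foldl, hb, ih]
        simp [h]
      · have hb : (c == '_' || c == '*') = false := by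
          push Not at h; simp [h.1, h.2]
        simp only [List.foldl, hb, Bool.false_eq_true, if_false, ih]
        simp [h]

theorem flatMap_compose (cs : List Char) :
    List.flatMap (fun c => if c = '*' then ['\\', '*'] else [c])
      (List.flatMap (fun c => if c = '_' then ['\\', '_'] else [c]) cs)
    = cs.flatMap (fun c => if c = '_' ∨ c = '*' then ['\\', c] else [c]) := by
  induction cs with
  | nil => simp
  | cons c t ih =>
      by_cases h1 : c = '_'
      · subst h1; simp only [List.flatMap_cons, List.flatMap_append, ih]; simp
      · by_cases h2 : c = '*'
        · subst h2; simp only [List.flatMap_cons, List.flatMap_append, ih]; simp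
        · simp only [List.flatMap_cons, List.flatMap_append, ih]; simp [h1, h2]

-- ===== VERDICT (by name: the statement is the Claim_ definition above) =====
theorem handle_discord_formatting_spec : Claim_equal_handle_discord_formatting := by
  intro text _
  unfold Spec_handle_discord_formatting handle_discord_formatting handle_discord_formatting_alt
  apply String.toList_injective
  rw [portA_toList]
  simp only [PySem.Str.toList_replace]
  rw [show ("_".toList) = ['_'] from rfl, show ("\\_".toList) = ['\\','_'] from rfl,
     show ("*".toList) = ['*'] from rfl, show ("\\*".toList) = ['\\','*'] from rfl,
     chars_replace_single, chars_replace_single, flatMap_compose]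
  simp
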